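-- pv_equiv track=rewrite | github.com/recore799/Hartree-Fock-explained | src/integrals/test3.py | generate_shells_bfs
-- ===== SOURCE A (Python) =====
-- def generate_shells_bfs(max_l):
--     from collections import deque
--     shells = [(0, 0, 0)]
--     queue = deque(shells)
--
--     while queue:
--         current = queue.popleft()
--         current_sum = sum(current)
--
--         if current_sum >= max_l:
--             continue
--
--         for i in range(3):
--             new_shell = list(current)
--             new_shell[i] += 1
--             new_shell = tuple(new_shell)
--
--             if new_shell not in shells:
--                 shells.append(new_shell)
--                 queue.append(new_shell)
--
--
--     return sorted(shells, key=lambda x: (sum(x), x))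
-- ===== SOURCE B (Python) =====
-- def generate_shells_bfs(max_l):
--     # Direct level-by-level enumeration: every triple with coordinate-sum s is
--     # generated exactly once, so no queue and no membership scans are needed.
--     shells = [(0, 0, 0)]
--     for s in range(1, max_l + 1):
--         for i in range(s + 1):
--             for j in range(s + 1 - i):
--                 shells.append((i, j, s - i - j))
--     return sorted(shells, key=lambda x: (sum(x), x))
-- ===== Notes on version B (the rewrite author's own statement) =====
-- stated objective: faster
-- what changed: Replaces the BFS worklist with its O(n) 'not in shells' membership scans by a direct level-by-level nested-loop enumeration that generates each triple exactly once before the final sort.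
import Mathlib
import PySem

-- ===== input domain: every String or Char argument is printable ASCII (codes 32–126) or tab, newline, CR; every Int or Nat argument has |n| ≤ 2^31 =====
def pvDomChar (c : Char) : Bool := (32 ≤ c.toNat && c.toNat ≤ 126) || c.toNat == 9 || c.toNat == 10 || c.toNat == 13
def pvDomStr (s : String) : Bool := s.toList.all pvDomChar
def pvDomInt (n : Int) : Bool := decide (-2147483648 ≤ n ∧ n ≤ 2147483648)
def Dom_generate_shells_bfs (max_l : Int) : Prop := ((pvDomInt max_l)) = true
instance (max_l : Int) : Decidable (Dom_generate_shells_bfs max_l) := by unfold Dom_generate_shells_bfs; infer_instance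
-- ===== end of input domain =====

-- B replaces A's BFS-with-membership-scans by a direct level-by-level enumeration (objective: faster).


-- ===== PORT A =====
-- `new_shell = list(current); new_shell[i] += 1; tuple(new_shell)` for i in range(3);
-- i is always 0,1,2 and current has length 3, so `.toNat` and `List.set`/`getD` are exact here.
def pvBump (t : List Int) (i : Int) : List Int := t.set i.toNat (t.getD i.toNat 0 + 1)

-- `if new_shell not in shells: shells.append(new_shell); queue.append(new_shell)`
def pvCondAdd (s : List (List Int) × List (List Int)) (t : List Int) :
    List (List Int) × List (List Int) :=
  if t ∈ s.1 then s else (s.1 ++ [t], s.2 ++ [t])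

-- the inner `for i in range(3)` loop of A
def pvExpand (cur : List Int) (s : List (List Int) × List (List Int)) :
    List (List Int) × List (List Int) :=
  (PySem.List.pyRange 0 3 1).foldl (fun s i => pvCondAdd s (pvBump cur i)) s

-- every triple A ever stores: length 3, nonnegative coordinates, coordinate sum ≤ max(max_l,0)
def pvGood (M : Int) (u : List Int) : Prop :=
  u.length = 3 ∧ (∀ x ∈ u, 0 ≤ x) ∧ u.sum ≤ max M 0

-- loop invariant of A's while-loop (totality guard for the port's recursion)
def pvInv (M : Int) (shells queue : List (List Int)) : Prop :=
  (∀ u ∈ shells, pvGood M u) ∧ (∀ u ∈ queue, u ∈ shells) ∧ shells.Nodup ∧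
  (∀ u ∈ shells, u.sum < M → u ∈ queue ∨ ∀ i ∈ ([0, 1, 2] : List Int), pvBump u i ∈ shells)

-- termination measure machinery (proof-side only; the loop's measure is plain arithmetic)
def pvEnc (t : List Int) : Int × Int × Int := (t.getD 0 0, t.getD 1 0, t.getD 2 0)
def pvPhi (M : Int) (shells queue : List (List Int)) : Nat :=
  2 * ((((max M 0).toNat + 1) ^ 3) - shells.length) + queue.length

theorem pvEnc_inj3 {a b : List Int} (ha : a.length = 3) (hb : b.length = 3)
    (h : pvEnc a = pvEnc b) : a = b := by
  obtain ⟨x, y, z, rfl⟩ := List.length_eq_three.mp ha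
  obtain ⟨x', y', z', rfl⟩ := List.length_eq_three.mp hb
  simp [pvEnc] at h
  simp [h.1, h.2.1, h.2.2]

theorem mem_foldl_condAdd_fst (ts : List (List Int)) (s : List (List Int) × List (List Int))
    (u : List Int) : u ∈ (ts.foldl pvCondAdd s).1 ↔ u ∈ s.1 ∨ u ∈ ts := by
  induction ts generalizing s with
  | nil => simp
  | cons t rest ih =>
    simp only [List.foldl_cons, pvCondAdd]
    by_cases hu : u = t
    · subst hu
      by_cases h : u ∈ s.1
      · rw [if_pos h, ih]; simp only [List.mem_cons]; tauto
      · rw [if_neg h, ih]; simp only [List.mem_append, List.mem_cons]; tauto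
    · by_cases h : t ∈ s.1
      · rw [if_pos h, ih]; simp only [List.mem_cons]; tauto
      · rw [if_neg h, ih]
        simp only [List.mem_append, List.mem_cons, List.not_mem_nil, or_false]
        tauto

theorem mem_foldl_condAdd_snd (ts : List (List Int)) (s : List (List Int) × List (List Int))
    (u : List Int) : u ∈ (ts.foldl pvCondAdd s).2 ↔ u ∈ s.2 ∨ (u ∈ ts ∧ u ∉ s.1) := by
  induction ts generalizing s with
  | nil => simp
  | cons t rest ih =>
    simp only [List.foldl_cons, pvCondAdd]
    by_cases hu : u = t
    · subst hu
      by_cases h : u ∈ s.1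
      · rw [if_pos h, ih]; simp only [List.mem_cons]; tauto
      · rw [if_neg h, ih]
        simp only [List.mem_append, List.mem_cons, List.not_mem_nil, or_false]
        tauto
    · by_cases h : t ∈ s.1
      · rw [if_pos h, ih]; simp only [List.mem_cons]; tauto
      · rw [if_neg h, ih]
        simp only [List.mem_append, List.mem_cons, List.not_mem_nil, or_false]
        tauto

theorem nodup_foldl_condAdd_fst (ts : List (List Int)) (s : List (List Int) × List (List Int))
    (h : s.1.Nodup) : (ts.foldl pvCondAdd s).1.Nodup := by
  induction ts generalizing s with
  | nil => exact h
  | cons t rest ih =>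
    simp only [List.foldl_cons, pvCondAdd]
    by_cases ht : t ∈ s.1
    · simp only [ht, if_true]; exact ih _ h
    · simp only [ht, if_false]
      refine ih _ ?_
      simp only [List.nodup_append]
      refine ⟨by simpa using h, by simp, ?_⟩
      intro a ha b hb
      simp only [List.mem_singleton] at hb
      subst hb
      exact fun heqab => ht (heqab ▸ ha)

theorem foldl_condAdd_lengths (ts : List (List Int)) (s : List (List Int) × List (List Int)) :
    ∃ k, (ts.foldl pvCondAdd s).1.length = s.1.length + k ∧
      (ts.foldl pvCondAdd s).2.length = s.2.length + k := by
  induction ts generalizing s with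
  | nil => exact ⟨0, by simp⟩
  | cons t rest ih =>
    simp only [List.foldl_cons, pvCondAdd]
    by_cases ht : t ∈ s.1
    · simpa [ht] using ih s
    · simp only [ht, if_false]
      obtain ⟨k, h1, h2⟩ := ih (s.1 ++ [t], s.2 ++ [t])
      exact ⟨k + 1, by simp at h1 h2 ⊢; omega⟩

theorem pvShells_le (M : Int) (shells queue : List (List Int))
    (h : pvInv M shells queue) : shells.length ≤ ((max M 0).toNat + 1) ^ 3 := by
  have hlen : ∀ u ∈ shells, u.length = 3 := fun u hu => (h.1 u hu).1
  have hnodup : (shells.map pvEnc).Nodup :=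
    h.2.2.1.map_on (fun x hx y hy hxy => pvEnc_inj3 (hlen x hx) (hlen y hy) hxy)
  have hcard : (shells.map pvEnc).toFinset.card = shells.length := by
    rw [List.toFinset_card_of_nodup hnodup, List.length_map]
  set C : Finset (Int × Int × Int) :=
    Finset.Icc (0 : Int) (max M 0) ×ˢ Finset.Icc (0 : Int) (max M 0) ×ˢ
      Finset.Icc (0 : Int) (max M 0) with hC
  have hsub : (shells.map pvEnc).toFinset ⊆ C := by
    intro p hp
    simp only [List.mem_toFinset, List.mem_map] at hp
    obtain ⟨u, hu, rfl⟩ := hp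
    obtain ⟨hl, hnn, hs⟩ := h.1 u hu
    obtain ⟨x, y, z, rfl⟩ := List.length_eq_three.mp hl
    have hx := hnn x (by simp); have hy := hnn y (by simp); have hz := hnn z (by simp)
    simp only [List.sum_cons, List.sum_nil, add_zero] at hs
    simp only [hC, pvEnc, Finset.mem_product, Finset.mem_Icc]
    refine ⟨⟨hx, ?_⟩, ⟨hy, ?_⟩, ⟨hz, ?_⟩⟩ <;> simp [List.getD] <;> omega
  have hCcard : C.card = ((max M 0).toNat + 1) ^ 3 := by
    have h1 : (Finset.Icc (0 : Int) (max M 0)).card = (max M 0).toNat + 1 := by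
      rw [Int.card_Icc]; omega
    simp [hC, Finset.card_product, h1]; ring
  calc shells.length = (shells.map pvEnc).toFinset.card := hcard.symm
    _ ≤ C.card := Finset.card_le_card hsub
    _ = _ := hCcard

theorem pvGood_bumps (M : Int) (cur : List Int) (hcur : pvGood M cur) (hlt : cur.sum < M) :
    ∀ t ∈ [pvBump cur 0, pvBump cur 1, pvBump cur 2], pvGood M t := by
  obtain ⟨hl, hnn, _⟩ := hcur
  obtain ⟨x, y, z, rfl⟩ := List.length_eq_three.mp hl
  have hx := hnn x (by simp); have hy := hnn y (by simp); have hz := hnn z (by simp)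
  have hsum : x + (y + z) < M := by simpa using hlt
  intro t ht
  simp only [List.mem_cons, List.not_mem_nil, or_false] at ht
  rcases ht with rfl | rfl | rfl <;>
    refine ⟨by simp [pvBump], ?_, ?_⟩ <;>
    simp [pvBump] <;> omega

theorem pvInv_skip (M : Int) (shells rest : List (List Int)) (cur : List Int)
    (hinv : pvInv M shells (cur :: rest)) (hge : M ≤ cur.sum) :
    pvInv M shells rest := by
  obtain ⟨h1, h2, h3, h4⟩ := hinv
  refine ⟨h1, fun u hu => h2 u (by simp [hu]), h3, ?_⟩
  intro u hu hlt
  rcases h4 u hu hlt with hq | hb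
  · rcases List.mem_cons.mp hq with rfl | h
    · omega
    · exact Or.inl h
  · exact Or.inr hb

theorem pvInv_expand (M : Int) (shells rest : List (List Int)) (cur : List Int)
    (hinv : pvInv M shells (cur :: rest)) (hlt : cur.sum < M) :
    pvInv M (pvExpand cur (shells, rest)).1 (pvExpand cur (shells, rest)).2 := by
  obtain ⟨h1, h2, h3, h4⟩ := hinv
  have hcur : pvGood M cur := h1 cur (h2 cur (by simp))
  have hts := pvGood_bumps M cur hcur hlt
  have heq : pvExpand cur (shells, rest)
      = ([pvBump cur 0, pvBump cur 1, pvBump cur 2]).foldl pvCondAdd (shells, rest) := rfl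
  rw [heq]
  set ts : List (List Int) := [pvBump cur 0, pvBump cur 1, pvBump cur 2] with hts_def
  have hmem1 := fun u => mem_foldl_condAdd_fst ts (shells, rest) u
  have hmem2 := fun u => mem_foldl_condAdd_snd ts (shells, rest) u
  refine ⟨?_, ?_, ?_, ?_⟩
  · intro u hu
    rcases (hmem1 u).mp hu with h | h
    · exact h1 u h
    · exact hts u h
  · intro u hu
    rcases (hmem2 u).mp hu with h | h
    · exact (hmem1 u).mpr (Or.inl (h2 u (by simp [h])))
    · exact (hmem1 u).mpr (Or.inr h.1)
  · exact nodup_foldl_condAdd_fst ts (shells, rest) h3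
  · intro u hu hsu
    rcases (hmem1 u).mp hu with h | h
    · -- u was already in shells
      rcases h4 u h hsu with hq | hb
      · rcases List.mem_cons.mp hq with rfl | hq'
        · -- u = cur: all its bumps are in ts, hence in the new shells
          refine Or.inr ?_
          intro i hi
          refine (hmem1 _).mpr (Or.inr ?_)
          simp only [List.mem_cons, List.not_mem_nil, or_false] at hi
          rcases hi with rfl | rfl | rfl <;> simp [hts_def]
        · exact Or.inl ((hmem2 u).mpr (Or.inl hq'))
      · exact Or.inr fun i hi => (hmem1 _).mpr (Or.inl (hb i hi))
    · -- u is one of the new shells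
      by_cases hsh : u ∈ shells
      · rcases h4 u hsh hsu with hq | hb
        · rcases List.mem_cons.mp hq with rfl | hq'
          · refine Or.inr ?_
            intro i hi
            refine (hmem1 _).mpr (Or.inr ?_)
            simp only [List.mem_cons, List.not_mem_nil, or_false] at hi
            rcases hi with rfl | rfl | rfl <;> simp [hts_def]
          · exact Or.inl ((hmem2 u).mpr (Or.inl hq'))
        · exact Or.inr fun i hi => (hmem1 _).mpr (Or.inl (hb i hi))
      · exact Or.inl ((hmem2 u).mpr (Or.inr ⟨h, hsh⟩))

theorem pvPhi_expand_lt (M : Int) (shells rest : List (List Int)) (cur : List Int)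
    (hinv : pvInv M shells (cur :: rest)) (hlt : cur.sum < M) :
    pvPhi M (pvExpand cur (shells, rest)).1 (pvExpand cur (shells, rest)).2
      < pvPhi M shells (cur :: rest) := by
  have hinv' := pvInv_expand M shells rest cur hinv hlt
  have hle := pvShells_le M _ _ hinv'
  have heq : pvExpand cur (shells, rest)
      = ([pvBump cur 0, pvBump cur 1, pvBump cur 2]).foldl pvCondAdd (shells, rest) := rfl
  obtain ⟨k, h1, h2⟩ := foldl_condAdd_lengths [pvBump cur 0, pvBump cur 1, pvBump cur 2]
    (shells, rest)
  rw [heq] at hle ⊢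
  simp only [pvPhi, h1, h2, List.length_cons] at hle ⊢
  omega

theorem pvInv_init (M : Int) : pvInv M [[0, 0, 0]] [[0, 0, 0]] := by
  refine ⟨?_, by simp, by simp, ?_⟩
  · intro u hu; simp at hu; subst hu
    exact ⟨by simp, by simp, by simp⟩
  · intro u hu _; simp at hu; subst hu; simp

-- A's while-loop; the invariant argument is a totality guard only.
def pvLoop (M : Int) (shells queue : List (List Int)) (h : pvInv M shells queue) :
    List (List Int) :=
  match hq : queue with
  | [] => shells
  | cur :: rest =>
    if hge : M ≤ cur.sum then
      pvLoop M shells rest (pvInv_skip M shells rest cur (hq ▸ h) hge)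
    else
      pvLoop M (pvExpand cur (shells, rest)).1 (pvExpand cur (shells, rest)).2
        (pvInv_expand M shells rest cur (hq ▸ h) (by omega))
  termination_by pvPhi M shells queue
  decreasing_by
  · simp [pvPhi]
  · exact pvPhi_expand_lt M shells rest cur (hq ▸ h) (by omega)

-- `sorted(shells, key=lambda x: (sum(x), x))` on the final shells list
def generate_shells_bfs (max_l : Int) : List (List Int) :=
  PySem.List.sorted2 (pvLoop max_l [[0, 0, 0]] [[0, 0, 0]] (pvInv_init max_l))
    (fun u => u.sum) (fun u => u)

-- ===== PORT B =====
def generate_shells_bfs_alt (max_l : Int) : List (List Int) :=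
  PySem.List.sorted2
    ((PySem.List.pyRange 1 (max_l + 1) 1).foldl (fun acc s =>
        (PySem.List.pyRange 0 (s + 1) 1).foldl (fun acc i =>
          (PySem.List.pyRange 0 (s + 1 - i) 1).foldl (fun acc j =>
            acc ++ [[i, j, s - i - j]]) acc) acc)
      [[0, 0, 0]])
    (fun u => u.sum) (fun u => u)

-- ===== PRECONDITION & SPEC =====
def Spec_generate_shells_bfs (max_l : Int) (out : List (List Int)) : Prop := out = generate_shells_bfs_alt max_l
instance (max_l : Int) (out : List (List Int)) : Decidable (Spec_generate_shells_bfs max_l out) := by unfold Spec_generate_shells_bfs; infer_instance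

-- ===== CLAIM (what is proved, stated in full; the proofs are below) =====
def Claim_equal_generate_shells_bfs : Prop := ∀ (max_l : Int), Dom_generate_shells_bfs max_l → Spec_generate_shells_bfs max_l (generate_shells_bfs max_l)

-- ===== LEMMAS AND PROOFS =====

-- the Python sort key (sum(x), x), as a single lexicographic key
def pvKey (u : List Int) : Lex (Int × List Int) := toLex (u.sum, u)

theorem pvKey_lt_iff (u v : List Int) :
    pvKey u < pvKey v ↔ u.sum < v.sum ∨ (u.sum = v.sum ∧ u < v) := by
  simpa [pvKey] using Prod.Lex.toLex_lt_toLex (x := (u.sum, u)) (y := (v.sum, v))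

theorem pvInsertBy_congr (f g : List Int → List Int → Bool)
    (h : ∀ a b, f a b = g a b) (x : List Int) (l : List (List Int)) :
    PySem.List.insertBy f x l = PySem.List.insertBy g x l := by
  induction l with
  | nil => rfl
  | cons y ys ih =>
    show (if f x y then _ else _) = (if g x y then _ else _)
    rw [h x y]
    by_cases hg : g x y = true
    · simp [hg]
    · simp only [Bool.not_eq_true] at hg
      simp [hg, ih]

theorem pvSorted2_eq_sorted (xs : List (List Int)) :
    PySem.List.sorted2 xs (fun u => u.sum) (fun u => u)
      = PySem.List.sorted xs pvKey := by
  show xs.foldl (fun acc x => PySem.List.insertBy _ x acc) []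
      = xs.foldl (fun acc x => PySem.List.insertBy _ x acc) []
  simp only [Bool.false_eq_true, if_false]
  refine PySem.List.foldl_congr_mem _ _ _ _ ?_
  intro acc x _
  refine pvInsertBy_congr _ _ (fun a b => ?_) x acc
  rcases lt_trichotomy a.sum b.sum with h | h | h
  · have hk : pvKey a < pvKey b := Prod.Lex.toLex_lt_toLex.mpr (Or.inl h)
    simp [h, hk]
  · have hk : pvKey a < pvKey b ↔ a < b := by
      simp [pvKey, Prod.Lex.toLex_lt_toLex, h]
    simp [h, hk]
  · have h1 : ¬ a.sum < b.sum := asymm h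
    have h2 : ¬ pvKey a < pvKey b := by
      rw [pvKey_lt_iff]
      rintro (hl | ⟨he, _⟩) <;> omega
    simp [h1, h2, h]

-- full characterisation of the final shells list of A's loop
theorem pvLoop_spec (M : Int) (shells queue : List (List Int)) (h : pvInv M shells queue) :
    (∀ u ∈ shells, u ∈ pvLoop M shells queue h) ∧
    (pvLoop M shells queue h).Nodup ∧
    (∀ u ∈ pvLoop M shells queue h, pvGood M u) ∧
    (∀ u ∈ pvLoop M shells queue h, u.sum < M →
      ∀ i ∈ ([0, 1, 2] : List Int), pvBump u i ∈ pvLoop M shells queue h) := by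
  fun_induction pvLoop with
  | case1 shells h h2 =>
    refine ⟨fun u hu => hu, h.2.2.1, h.1, ?_⟩
    intro u hu hlt
    rcases h.2.2.2 u hu hlt with hq | hb
    · exact absurd hq (List.not_mem_nil)
    · exact hb
  | case2 shells cur rest h hge h2 ih =>
    obtain ⟨ih1, ih2, ih3, ih4⟩ := ih
    exact ⟨ih1, ih2, ih3, ih4⟩
  | case3 shells cur rest h hge h2 ih =>
    obtain ⟨ih1, ih2, ih3, ih4⟩ := ih
    refine ⟨?_, ih2, ih3, ih4⟩
    intro u hu
    refine ih1 u ?_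
    have heq : pvExpand cur (shells, rest)
        = ([pvBump cur 0, pvBump cur 1, pvBump cur 2]).foldl pvCondAdd (shells, rest) := rfl
    rw [heq]
    exact (mem_foldl_condAdd_fst _ _ u).mpr (Or.inl hu)

theorem pvComplete (M : Int) (res : List (List Int))
    (h0 : [0, 0, 0] ∈ res)
    (hclosed : ∀ u ∈ res, u.sum < M → ∀ i ∈ ([0, 1, 2] : List Int), pvBump u i ∈ res) :
    ∀ (n : Nat) (u : List Int), pvGood M u → u.sum.toNat = n → u ∈ res := by
  intro n
  induction n using Nat.strong_induction_on with
  | _ n ih =>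
    intro u hg hn
    obtain ⟨hl, hnn, hs⟩ := hg
    obtain ⟨x, y, z, rfl⟩ := List.length_eq_three.mp hl
    have hx := hnn x (by simp); have hy := hnn y (by simp); have hz := hnn z (by simp)
    simp only [List.sum_cons, List.sum_nil, add_zero] at hs hn
    by_cases hzero : x = 0 ∧ y = 0 ∧ z = 0
    · obtain ⟨rfl, rfl, rfl⟩ := hzero; exact h0
    · have hpos : 0 < x + (y + z) := by omega
      have hM : 1 ≤ M := by
        rcases le_or_gt M 0 with hM0 | hM0
        · omega
        · omega
      -- the predecessor triple: decrement the last positive coordinate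
      rcases (by omega : 0 < z ∨ (z = 0 ∧ 0 < y) ∨ (z = 0 ∧ y = 0 ∧ 0 < x)) with hc | hc | hc
      · have hpred : [x, y, z - 1] ∈ res := by
          refine ih (x + (y + (z - 1))).toNat (by omega) _ ⟨by simp, ?_, ?_⟩ (by simp) <;>
            simp <;> omega
        have := hclosed _ hpred (by simp; omega) 2 (by simp)
        simpa [pvBump, show z - 1 + 1 = z by omega] using this
      · have hpred : [x, y - 1, z] ∈ res := by
          refine ih (x + (y - 1 + z)).toNat (by omega) _ ⟨by simp, ?_, ?_⟩ (by simp) <;>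
            simp <;> omega
        have := hclosed _ hpred (by simp; omega) 1 (by simp)
        simpa [pvBump, show y - 1 + 1 = y by omega] using this
      · have hpred : [x - 1, y, z] ∈ res := by
          refine ih (x - 1 + (y + z)).toNat (by omega) _ ⟨by simp, ?_, ?_⟩ (by simp) <;>
            simp <;> omega
        have := hclosed _ hpred (by simp; omega) 0 (by simp)
        simpa [pvBump, show x - 1 + 1 = x by omega] using this

theorem mem_pvFinal (M : Int) (u : List Int) :
    u ∈ pvLoop M [[0, 0, 0]] [[0, 0, 0]] (pvInv_init M) ↔ pvGood M u := by
  obtain ⟨h1, _, h3, h4⟩ := pvLoop_spec M [[0, 0, 0]] [[0, 0, 0]] (pvInv_init M)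
  exact ⟨h3 u, fun hg => pvComplete M _ (h1 _ (by simp)) h4 u.sum.toNat u hg rfl⟩

-- B's pre-sort list
def pvBList (M : Int) : List (List Int) :=
  [[0, 0, 0]] ++ (PySem.List.pyRange 1 (M + 1) 1).flatMap (fun s =>
    (PySem.List.pyRange 0 (s + 1) 1).flatMap (fun i =>
      (PySem.List.pyRange 0 (s + 1 - i) 1).map (fun j => [i, j, s - i - j])))

theorem pvAlt_eq (M : Int) :
    generate_shells_bfs_alt M
      = PySem.List.sorted2 (pvBList M) (fun u => u.sum) (fun u => u) := by
  unfold generate_shells_bfs_alt pvBList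
  congr 1
  simp only [PySem.List.foldl_append_singleton_eq_map, PySem.List.foldl_append_eq_flatMap]

theorem mem_pvBList (M : Int) (u : List Int) : u ∈ pvBList M ↔ pvGood M u := by
  simp only [pvBList, List.mem_append, List.mem_singleton, List.mem_flatMap,
    List.mem_map, PySem.List.mem_pyRange_one]
  constructor
  · rintro (rfl | ⟨s, ⟨hs1, hs2⟩, i, ⟨hi1, hi2⟩, j, ⟨hj1, hj2⟩, rfl⟩)
    · exact ⟨by simp, by simp, by simp⟩
    · refine ⟨by simp, ?_, ?_⟩ <;> simp <;> omega
  · rintro ⟨hl, hnn, hs⟩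
    obtain ⟨x, y, z, rfl⟩ := List.length_eq_three.mp hl
    have hx := hnn x (by simp); have hy := hnn y (by simp); have hz := hnn z (by simp)
    simp only [List.sum_cons, List.sum_nil, add_zero] at hs
    by_cases hzero : x = 0 ∧ y = 0 ∧ z = 0
    · obtain ⟨rfl, rfl, rfl⟩ := hzero; exact Or.inl rfl
    · refine Or.inr ⟨x + y + z, ⟨by omega, by omega⟩, x, ⟨by omega, by omega⟩,
        y, ⟨by omega, by omega⟩, by simp; omega⟩

theorem pairwise_pvBList (M : Int) :
    (pvBList M).Pairwise (fun a b => pvKey a < pvKey b) := by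
  unfold pvBList
  rw [List.singleton_append, List.pairwise_cons]
  constructor
  · intro u hu
    simp only [List.mem_flatMap, List.mem_map, PySem.List.mem_pyRange_one] at hu
    obtain ⟨s, ⟨hs1, _⟩, i, _, j, _, rfl⟩ := hu
    rw [pvKey_lt_iff]
    left
    simp
    omega
  · rw [List.pairwise_flatMap]
    constructor
    · -- within one level s: equal sums, lexicographically increasing triples
      intro s hs
      rw [List.pairwise_flatMap]
      constructor
      · intro i hi
        rw [List.pairwise_map]
        refine (PySem.List.pairwise_lt_pyRange_one 0 (s + 1 - i)).imp ?_
        intro j j' hjj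
        rw [pvKey_lt_iff]
        right
        constructor
        · simp
        · exact List.cons_lt_cons_iff.mpr (Or.inr ⟨rfl,
            List.cons_lt_cons_iff.mpr (Or.inl hjj)⟩)
      · refine (PySem.List.pairwise_lt_pyRange_one 0 (s + 1)).imp ?_
        intro i i' hii u hu v hv
        simp only [List.mem_map, PySem.List.mem_pyRange_one] at hu hv
        obtain ⟨j, _, rfl⟩ := hu
        obtain ⟨j', _, rfl⟩ := hv
        rw [pvKey_lt_iff]
        right
        constructor
        · simp
        · exact List.cons_lt_cons_iff.mpr (Or.inl hii)
    · -- across levels: sums strictly increase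
      refine (PySem.List.pairwise_lt_pyRange_one 1 (M + 1)).imp ?_
      intro s s' hss u hu v hv
      simp only [List.mem_flatMap, List.mem_map, PySem.List.mem_pyRange_one] at hu hv
      obtain ⟨i, _, j, _, rfl⟩ := hu
      obtain ⟨i', _, j', _, rfl⟩ := hv
      rw [pvKey_lt_iff]
      left
      simp
      omega

theorem nodup_pvBList (M : Int) : (pvBList M).Nodup :=
  (pairwise_pvBList M).imp (fun h => by rintro rfl; exact lt_irrefl _ h)

-- ===== VERDICT (by name: the statement is the Claim_ definition above) =====
theorem generate_shells_bfs_spec : Claim_equal_generate_shells_bfs := by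
  intro max_l _
  unfold Spec_generate_shells_bfs
  rw [pvAlt_eq]
  unfold generate_shells_bfs
  rw [pvSorted2_eq_sorted, pvSorted2_eq_sorted]
  have hperm : (pvBList max_l).Perm (pvLoop max_l [[0, 0, 0]] [[0, 0, 0]] (pvInv_init max_l)) := by
    refine (List.perm_ext_iff_of_nodup (nodup_pvBList max_l)
      (pvLoop_spec max_l _ _ (pvInv_init max_l)).2.1).mpr ?_
    intro u
    rw [mem_pvBList, mem_pvFinal]
  rw [PySem.List.sorted_eq_of_perm_of_pairwise_lt _ _ pvKey hperm (pairwise_pvBList max_l),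
    PySem.List.sorted_eq_of_perm_of_pairwise_lt _ _ pvKey (List.Perm.refl _) (pairwise_pvBList max_l)]
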